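-- pv_equiv track=rewrite | github.com/fraiseql/fraisier | fraisier/db/postgres_adapter.py | _convert_placeholders
-- ===== SOURCE A (Python) =====
-- def _convert_placeholders(query: str) -> str:
--     """Convert ? placeholders to PostgreSQL $N format.
--
--     Args:
--         query: SQL query potentially using ? placeholders
--
--     Returns:
--         Query with PostgreSQL $N placeholders
--     """
--     if "?" not in query:
--         return query
--
--     # Replace ? with $1, $2, etc.
--     result = []
--     param_count = 0
--     for char in query:
--         if char == "?":
--             param_count += 1
--             result.append(f"${param_count}")
--         else:
--             result.append(char)
--
--     return "".join(result)
-- ===== SOURCE B (Python) =====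
-- def _convert_placeholders(query: str) -> str:
--     parts = query.split("?")
--     out = parts[0]
--     for i in range(1, len(parts)):
--         out += f"${i}" + parts[i]
--     return out
-- ===== Notes on version B (the rewrite author's own statement) =====
-- stated objective: simpler
-- what changed: B splits the query on '?' once and rebuilds the result by interleaving indexed '$N' joiners between the segments, instead of A's character-by-character scan with a running counter and per-character list appends.
import Mathlib
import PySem

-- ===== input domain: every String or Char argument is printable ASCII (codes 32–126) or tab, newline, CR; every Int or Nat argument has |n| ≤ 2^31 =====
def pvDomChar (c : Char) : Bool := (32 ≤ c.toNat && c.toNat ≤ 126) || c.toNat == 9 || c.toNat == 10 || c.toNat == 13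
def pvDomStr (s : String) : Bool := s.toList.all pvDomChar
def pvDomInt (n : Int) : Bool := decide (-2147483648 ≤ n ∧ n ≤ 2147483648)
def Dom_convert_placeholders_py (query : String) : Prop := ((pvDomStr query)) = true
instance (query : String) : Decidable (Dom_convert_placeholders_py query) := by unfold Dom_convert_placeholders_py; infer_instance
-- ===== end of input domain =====

-- B rebuilds the result from query.split("?") segments with indexed "$N" joiners instead of
-- A's character-by-character scan with a running counter; objective: simpler. Same return value everywhere.

-- ===== PORT A =====
-- A: early return if "?" not in query; else scan characters, appending "$<count>" for each '?'.
def convert_placeholders_py (query : String) : String :=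
  if PySem.Chars.isIn ['?'] query.toList = false then query
  else
    String.mk (PySem.Chars.join []
      (query.toList.foldl
        (fun (st : List (List Char) × Int) c =>
          if c = '?' then (st.1 ++ ['$' :: PySem.Int.toChars (st.2 + 1)], st.2 + 1)
          else (st.1 ++ [[c]], st.2))
        ([], 0)).1)

-- ===== PORT B =====
-- B helper: the loop 'for i in range(1, len(parts)): out += f"${i}" + parts[i]', as recursion over the tail segments.
def convertAltGo (i : Int) : List (List Char) → List Char
  | [] => []
  | p :: rest => ('$' :: PySem.Int.toChars i) ++ p ++ convertAltGo (i + 1) rest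

def convert_placeholders_py_alt (query : String) : String :=
  match PySem.Chars.splitOn query.toList ['?'] with
  | [] => query   -- unreachable: split always yields at least one segment
  | p0 :: rest => String.mk (p0 ++ convertAltGo 1 rest)

-- ===== PRECONDITION & SPEC =====
def Spec_convert_placeholders_py (query : String) (out : String) : Prop := out = convert_placeholders_py_alt query
instance (query : String) (out : String) : Decidable (Spec_convert_placeholders_py query out) := by unfold Spec_convert_placeholders_py; infer_instance

-- ===== CLAIM (what is proved, stated in full; the proofs are below) =====
def Claim_equal_convert_placeholders_py : Prop := ∀ (query : String), Dom_convert_placeholders_py query → Spec_convert_placeholders_py query (convert_placeholders_py query)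

-- ===== LEMMAS AND PROOFS =====

-- Reference function: the converted character list, threading the running count n.
def convertSpecGo : List Char → Int → List Char
  | [], _ => []
  | c :: cs, n =>
    if c = '?' then ('$' :: PySem.Int.toChars (n + 1)) ++ convertSpecGo cs (n + 1)
    else c :: convertSpecGo cs n

-- Simple split of a char list on '?' (nonempty result, segments between '?'s).
def mySplit : List Char → List (List Char)
  | [] => [[]]
  | c :: cs =>
    if c = '?' then [] :: mySplit cs
    else match mySplit cs with
      | [] => [[c]]
      | p :: rest => (c :: p) :: rest

theorem mySplit_ne_nil (cs : List Char) : mySplit cs ≠ [] := by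
  cases cs with
  | nil => simp [mySplit]
  | cons c cs =>
    simp only [mySplit]
    split
    · simp
    · split <;> simp

theorem join_nil_flatten (l : List (List Char)) :
    PySem.Chars.join [] l = l.flatten := by
  induction l with
  | nil => simp [PySem.Chars.join_nil]
  | cons p rest ih =>
    cases rest with
    | nil => simp [PySem.Chars.join_singleton]
    | cons q r => simp [PySem.Chars.join_cons_cons] at ih ⊢; simpa using ih

theorem splitOn_go_mySplit : ∀ (fuel : Nat) (l cur : List Char) (acc : List (List Char)),
    l.length ≤ fuel →
    PySem.Chars.splitOn.go ['?'] fuel l cur acc =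
      acc.reverse ++ (match mySplit l with
        | [] => [cur.reverse]
        | p :: rest => (cur.reverse ++ p) :: rest) := by
  intro fuel
  induction fuel with
  | zero =>
    intro l cur acc h
    have hl : l = [] := List.length_eq_zero_iff.mp (Nat.le_zero.mp h)
    subst hl
    simp [PySem.Chars.splitOn.go, mySplit]
  | succ fuel ih =>
    intro l cur acc h
    cases l with
    | nil => simp [PySem.Chars.splitOn.go, mySplit]
    | cons c rest =>
      by_cases hc : c = '?'
      · subst hc
        have hpre : List.isPrefixOf ['?'] ('?' :: rest) = true := by
          simp [List.isPrefixOf]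
        rw [PySem.Chars.splitOn.go]
        simp only [hpre, if_true, List.length_singleton, List.length_nil, List.drop_succ_cons, List.drop_zero]
        rw [ih rest [] (List.reverse cur :: acc) (by simp at h; omega)]
        simp only [mySplit, if_pos rfl]
        cases hms : mySplit rest with
        | nil => exact absurd hms (mySplit_ne_nil rest)
        | cons p r => simp
      · have hpre : List.isPrefixOf ['?'] (c :: rest) = false := by
          simp only [List.isPrefixOf, Bool.and_true, beq_eq_false_iff_ne, ne_eq]
          exact fun e => hc e.symm
        rw [PySem.Chars.splitOn.go]
        simp only [hpre, if_false] at *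
        rw [ih rest (c :: cur) acc (by simpa using Nat.le_of_succ_le_succ h)]
        simp only [mySplit, if_neg hc]
        cases hms : mySplit rest with
        | nil => exact absurd hms (mySplit_ne_nil rest)
        | cons p r => simp

theorem splitOn_eq_mySplit (cs : List Char) :
    PySem.Chars.splitOn cs ['?'] = mySplit cs := by
  have := splitOn_go_mySplit (cs.length + 1) cs [] [] (by omega)
  rw [PySem.Chars.splitOn, this]
  cases hms : mySplit cs with
  | nil => exact absurd hms (mySplit_ne_nil cs)
  | cons p rest => simp

-- B side: the split-and-interleave computation equals the reference.
theorem mySplit_spec : ∀ (cs : List Char) (n : Int) (p : List Char) (rest : List (List Char)),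
    mySplit cs = p :: rest → p ++ convertAltGo (n + 1) rest = convertSpecGo cs n := by
  intro cs
  induction cs with
  | nil =>
    intro n p rest h
    simp [mySplit] at h
    obtain ⟨hp, hr⟩ := h
    subst hp; subst hr
    simp [convertAltGo, convertSpecGo]
  | cons c cs ih =>
    intro n p rest h
    by_cases hc : c = '?'
    · subst hc
      simp [mySplit] at h
      obtain ⟨hp, hr⟩ := h
      subst hp; subst hr
      cases hms : mySplit cs with
      | nil => exact absurd hms (mySplit_ne_nil cs)
      | cons q r =>
        have := ih (n + 1) q r hms
        simp only [convertAltGo, convertSpecGo, reduceIte, List.nil_append, List.append_assoc]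
        rw [this]
    · simp only [mySplit, if_neg hc] at h
      cases hms : mySplit cs with
      | nil => exact absurd hms (mySplit_ne_nil cs)
      | cons q r =>
        rw [hms] at h
        obtain ⟨hp, hr⟩ := List.cons.injEq .. ▸ h
        subst hp; subst hr
        simp only [convertSpecGo, if_neg hc]
        have := ih n q r hms
        simpa using this

-- A side: the foldl accumulator, flattened, is the accumulated output plus the reference of the remainder.
theorem foldA_spec : ∀ (cs : List Char) (acc : List (List Char)) (n : Int),
    (cs.foldl
      (fun (st : List (List Char) × Int) c =>
        if c = '?' then (st.1 ++ ['$' :: PySem.Int.toChars (st.2 + 1)], st.2 + 1)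
        else (st.1 ++ [[c]], st.2))
      (acc, n)).1.flatten = acc.flatten ++ convertSpecGo cs n := by
  intro cs
  induction cs with
  | nil => intro acc n; simp [convertSpecGo]
  | cons c cs ih =>
    intro acc n
    by_cases hc : c = '?'
    · subst hc
      simp only [List.foldl_cons, if_pos rfl]
      rw [ih]
      simp [convertSpecGo]
    · simp only [List.foldl_cons, if_neg hc]
      rw [ih]
      simp [convertSpecGo, hc]

-- If there is no '?', the reference is the identity.
theorem convertSpecGo_no_q : ∀ (cs : List Char) (n : Int), '?' ∉ cs → convertSpecGo cs n = cs := by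
  intro cs
  induction cs with
  | nil => intro n _; simp [convertSpecGo]
  | cons c cs ih =>
    intro n h
    have hc : c ≠ '?' := by simp at h; tauto
    have hm : '?' ∉ cs := by simp at h; tauto
    simp [convertSpecGo, hc, ih n hm]

theorem alt_eq_spec (query : String) :
    convert_placeholders_py_alt query = String.mk (convertSpecGo query.toList 0) := by
  unfold convert_placeholders_py_alt
  rw [splitOn_eq_mySplit]
  cases hms : mySplit query.toList with
  | nil => exact absurd hms (mySplit_ne_nil _)
  | cons p rest =>
    have := mySplit_spec query.toList 0 p rest hms
    simp only [zero_add] at this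
    dsimp only
    rw [this]

-- ===== VERDICT (by name: the statement is the Claim_ definition above) =====
theorem convert_placeholders_py_spec : Claim_equal_convert_placeholders_py := by
  intro query _
  unfold Spec_convert_placeholders_py
  rw [alt_eq_spec]
  unfold convert_placeholders_py
  by_cases hin : PySem.Chars.isIn ['?'] query.toList = false
  · rw [if_pos hin]
    have hnq : '?' ∉ query.toList := by
      have hni := (PySem.Chars.isIn_eq_false_iff ['?'] query.toList).mp hin
      intro hmem
      obtain ⟨s, t, hst⟩ := List.append_of_mem hmem
      exact hni ⟨s, t, by simp [hst]⟩
    rw [convertSpecGo_no_q query.toList 0 hnq]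
    exact String.ofList_toList.symm
  · rw [if_neg hin]
    rw [join_nil_flatten]
    rw [foldA_spec query.toList [] 0]
    simp
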